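-- pv_equiv track=rewrite | github.com/tomarfaruk/Competitive-programming | Hackerrank/Algorithoms/Sorting/Fraudulent Activity Notifications.py | med_even
-- ===== SOURCE A (Python) =====
-- def med_even(data, reser):
--     res = 0
--     count = None
--     temp0 = reser // 2
--     temp1 = temp0 + 1
--     for i, value in enumerate(data):
--         res += value
--         if res == temp0:
--             count = i
--         if res > temp0:
--             if count != None:
--                 count += i
--                 return count
--             else:
--                 return 2*i
-- ===== SOURCE B (Python) =====
-- def med_even(data, reser):
--     temp0 = reser // 2
--     cum = []
--     s = 0
--     for v in data:
--         s += v
--         cum.append(s)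
--     j = next((i for i, c in enumerate(cum) if c > temp0), None)
--     if j is None:
--         return None
--     for k in range(j - 1, -1, -1):
--         if cum[k] == temp0:
--             return j + k
--     return 2 * j
-- ===== Notes on version B (the rewrite author's own statement) =====
-- stated objective: alternative
-- what changed: A does one accumulating early-exit scan that carries a running sum and a remembered last index where the sum equalled reser//2; B instead materialises the full prefix-sum table, locates the first index exceeding reser//2 in it, and then scans that table backwards for the last exact hit, combining the two positions in a closed form.
import Mathlib
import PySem

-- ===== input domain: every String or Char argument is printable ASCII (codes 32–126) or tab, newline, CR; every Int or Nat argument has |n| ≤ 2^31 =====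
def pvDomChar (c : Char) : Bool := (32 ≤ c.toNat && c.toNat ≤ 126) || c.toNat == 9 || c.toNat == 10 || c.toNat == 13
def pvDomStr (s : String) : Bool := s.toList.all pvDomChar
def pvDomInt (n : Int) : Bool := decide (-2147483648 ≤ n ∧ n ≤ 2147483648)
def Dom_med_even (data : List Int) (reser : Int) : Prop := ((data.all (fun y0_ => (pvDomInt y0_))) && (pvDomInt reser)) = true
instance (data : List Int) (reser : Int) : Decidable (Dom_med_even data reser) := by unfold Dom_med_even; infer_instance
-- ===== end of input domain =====

-- B replaces A's single accumulating early-exit scan (running sum + remembered equality index)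
-- by building the full prefix-sum table once, locating the first crossing in it, then scanning
-- backwards for the last exact hit (objective: alternative decomposition, same cost).

-- ===== PORT A =====
-- A's for-loop over enumerate(data) with state (res, count); early return inside the loop.
def medEvenA_loop (temp0 : Int) : List (Int × Int) → Int → Option Int → Option Int
  | [], _, _ => none
  | (i, value) :: rest, res, count =>
    let res := res + value
    let count := if res = temp0 then some i else count
    if res > temp0 then
      match count with
      | some c => some (c + i)
      | none => some (2 * i)
    else medEvenA_loop temp0 rest res count

def med_even (data : List Int) (reser : Int) : Option Int :=
  let temp0 := PySem.Int.floordiv reser 2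
  medEvenA_loop temp0 (PySem.List.enumerate data) 0 none

-- ===== PORT B =====
-- cum list built by one pass with running sum s
def medEvenB_cum : List Int → Int → List Int
  | [], _ => []
  | v :: rest, s => (s + v) :: medEvenB_cum rest (s + v)

-- next((i for i, c in enumerate(cum) if c > temp0), None)
def medEvenB_firstGt (temp0 : Int) : List (Int × Int) → Option Int
  | [] => none
  | (i, c) :: rest => if c > temp0 then some i else medEvenB_firstGt temp0 rest

-- for k in range(j-1, -1, -1): if cum[k] == temp0: return j + k;  then: return 2*j
-- fuel m+1 checks index m first (= descending scan); indices are in range, getD is exact here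
def medEvenB_back (cum : List Int) (temp0 : Int) (j : Int) : Nat → Option Int
  | 0 => some (2 * j)
  | m + 1 => if cum.getD m 0 = temp0 then some (j + m) else medEvenB_back cum temp0 j m

def med_even_alt (data : List Int) (reser : Int) : Option Int :=
  let temp0 := PySem.Int.floordiv reser 2
  let cum := medEvenB_cum data 0
  match medEvenB_firstGt temp0 (PySem.List.enumerate cum) with
  | none => none
  | some j => medEvenB_back cum temp0 j j.toNat

-- ===== PRECONDITION & SPEC =====
def Spec_med_even (data : List Int) (reser : Int) (out : Option Int) : Prop := out = med_even_alt data reser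
instance (data : List Int) (reser : Int) (out : Option Int) : Decidable (Spec_med_even data reser out) := by unfold Spec_med_even; infer_instance

-- ===== CLAIM (what is proved, stated in full; the proofs are below) =====
def Claim_equal_med_even : Prop := ∀ (data : List Int) (reser : Int), Dom_med_even data reser → Spec_med_even data reser (med_even data reser)

-- ===== LEMMAS AND PROOFS =====

-- relative first-crossing index in a cum list
def firstGtRel (temp0 : Int) : List Int → Option Nat
  | [] => none
  | c :: rest => if c > temp0 then some 0 else (firstGtRel temp0 rest).map (· + 1)

-- generalized backwards search: relative indices m-1 .. 0 of cum (absolute n+·), crossing at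
-- absolute n+r; fallback is A's remembered count
def backGen (cum : List Int) (temp0 : Int) (n : Int) (r : Nat) (count : Option Int) : Nat → Option Int
  | 0 =>
    match count with
    | some c => some (c + (n + r))
    | none => some (2 * (n + r))
  | m + 1 => if cum.getD m 0 = temp0 then some ((n + r) + (n + m)) else backGen cum temp0 n r count m

-- common reference value for the loop started at absolute index n with state (res, count)
def altGen (temp0 : Int) (data : List Int) (n : Int) (res : Int) (count : Option Int) : Option Int :=
  match firstGtRel temp0 (medEvenB_cum data res) with
  | none => none
  | some r => backGen (medEvenB_cum data res) temp0 n r count r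

theorem backGen_cons (c0 : Int) (cum : List Int) (temp0 n : Int) (r : Nat) (count : Option Int) :
    ∀ m : Nat, m ≤ r →
      backGen (c0 :: cum) temp0 n (r + 1) count (m + 1) =
        backGen cum temp0 (n + 1) r (if c0 = temp0 then some n else count) m := by
  intro m
  induction m with
  | zero =>
    intro _
    simp only [backGen, List.getD_cons_zero]
    by_cases h : c0 = temp0
    · rw [if_pos h, if_pos h]
      congr 1
      push_cast
      ring
    · rw [if_neg h, if_neg h]
      match count with
      | none => simp only [backGen]; congr 1; push_cast; ring
      | some c => simp only [backGen]; congr 1; push_cast; ring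
  | succ m ih =>
    intro hm
    simp only [backGen, List.getD_cons_succ]
    by_cases h : cum.getD m 0 = temp0
    · rw [if_pos h, if_pos h]
      push_cast
      ring_nf
    · rw [if_neg h, if_neg h]
      exact ih (by omega)

theorem loopA_eq_altGen (temp0 : Int) :
    ∀ (data : List Int) (n res : Int) (count : Option Int),
      medEvenA_loop temp0 (PySem.List.enumerate data n) res count = altGen temp0 data n res count := by
  intro data
  induction data with
  | nil => intro n res count; simp [PySem.List.enumerate_nil, medEvenA_loop, altGen, medEvenB_cum, firstGtRel]
  | cons v rest ih =>
    intro n res count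
    rw [PySem.List.enumerate_cons]
    by_cases hgt : res + v > temp0
    · -- crossing at the first remaining index: B's back search has empty range, falls to count
      have hne : ¬ (res + v = temp0) := by omega
      simp only [medEvenA_loop, altGen, medEvenB_cum, firstGtRel, if_pos hgt, if_neg hne]
      match count with
      | none => simp [backGen]
      | some c => simp [backGen]
    · have hle : ¬ (temp0 < res + v) := hgt
      simp only [medEvenA_loop, altGen, medEvenB_cum, firstGtRel, if_neg hle]
      by_cases heq : res + v = temp0
      · simp only [if_pos heq]
        rw [ih (n + 1) (res + v) (some n)]
        simp only [altGen]
        cases hfr : firstGtRel temp0 (medEvenB_cum rest (res + v)) with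
        | none => simp
        | some r =>
          simp only [Option.map_some]
          have := backGen_cons (res + v) (medEvenB_cum rest (res + v)) temp0 n r count r le_rfl
          rw [this, if_pos heq]
      · simp only [if_neg heq]
        rw [ih (n + 1) (res + v) count]
        simp only [altGen]
        cases hfr : firstGtRel temp0 (medEvenB_cum rest (res + v)) with
        | none => simp
        | some r =>
          simp only [Option.map_some]
          have := backGen_cons (res + v) (medEvenB_cum rest (res + v)) temp0 n r count r le_rfl
          rw [this, if_neg heq]

theorem firstGt_enumerate (temp0 : Int) :
    ∀ (cum : List Int) (n : Int),
      medEvenB_firstGt temp0 (PySem.List.enumerate cum n) = (firstGtRel temp0 cum).map (fun r => n + (r : Int)) := by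
  intro cum
  induction cum with
  | nil => intro n; simp [PySem.List.enumerate_nil, medEvenB_firstGt, firstGtRel]
  | cons c rest ih =>
    intro n
    rw [PySem.List.enumerate_cons]
    by_cases h : c > temp0
    · simp [medEvenB_firstGt, firstGtRel, h]
    · simp only [medEvenB_firstGt, firstGtRel, if_neg h, ih (n + 1)]
      cases firstGtRel temp0 rest <;> simp <;> ring_nf

theorem back_eq_backGen (cum : List Int) (temp0 : Int) (r : Nat) :
    ∀ m : Nat, medEvenB_back cum temp0 (r : Int) m = backGen cum temp0 0 r none m := by
  intro m
  induction m with
  | zero => simp [medEvenB_back, backGen]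
  | succ m ih =>
    simp only [medEvenB_back, backGen]
    by_cases h : cum.getD m 0 = temp0
    · rw [if_pos h, if_pos h]
      ring_nf
    · rw [if_neg h, if_neg h]
      exact ih

theorem alt_eq_altGen (data : List Int) (temp0 : Int) :
    (match medEvenB_firstGt temp0 (PySem.List.enumerate (medEvenB_cum data 0)) with
      | none => none
      | some j => medEvenB_back (medEvenB_cum data 0) temp0 j j.toNat) =
      altGen temp0 data 0 0 none := by
  rw [firstGt_enumerate]
  unfold altGen
  cases hfr : firstGtRel temp0 (medEvenB_cum data 0) with
  | none => simp
  | some r =>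
    simp only [Option.map_some, zero_add, Int.toNat_natCast]
    exact back_eq_backGen _ _ _ _

-- ===== VERDICT (by name: the statement is the Claim_ definition above) =====
theorem med_even_spec : Claim_equal_med_even := by
  intro data reser _
  unfold Spec_med_even med_even med_even_alt
  rw [loopA_eq_altGen, ← alt_eq_altGen]
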